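-- pv_equiv track=rewrite | github.com/slm-rag/simple_qa_processing | extract_long_answer.py | get_paragraph_containing_position
-- ===== SOURCE A (Python) =====
-- from typing import List, Optional, Tuple
--
-- MIN_PARAGRAPHS = 2  # минимум абзацев, чтобы использовать разбивку по абзацам
--
-- def split_into_paragraphs(text: str) -> List[str]:
--     """Разбивает текст на абзацы по двойному переносу строки."""
--     if not text or not text.strip():
--         return []
--     paragraphs = [p.strip() for p in text.split('\n\n') if p.strip()]
--     return paragraphs
--
-- def get_paragraph_containing_position(text: str, pos_chars: int) -> Optional[str]:
--     """
--     Возвращает абзац, содержащий позицию pos_chars.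
--     Если абзацев нет (один сплошной текст) — возвращает None.
--     """
--     paragraphs = split_into_paragraphs(text)
--     if len(paragraphs) < MIN_PARAGRAPHS:
--         return None
--     cumul = 0
--     for p in paragraphs:
--         cumul += len(p) + 2  # +2 за \n\n
--         if cumul > pos_chars:
--             return p
--     return paragraphs[-1] if paragraphs else None
-- ===== SOURCE B (Python) =====
-- from typing import List, Optional
--
-- MIN_PARAGRAPHS = 2
--
-- def split_into_paragraphs(text: str) -> List[str]:
--     if not text or not text.strip():
--         return []
--     return [p.strip() for p in text.split('\n\n') if p.strip()]
--
-- def get_paragraph_containing_position(text: str, pos_chars: int) -> Optional[str]: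
--     paragraphs = split_into_paragraphs(text)
--     if len(paragraphs) < MIN_PARAGRAPHS:
--         return None
--     # prefix[i] = sum of (len(p)+2) over paragraphs[:i+1]
--     prefix = []
--     total = 0
--     for p in paragraphs:
--         total += len(p) + 2
--         prefix.append(total)
--     # binary search: smallest index whose cumulative total exceeds pos_chars
--     lo, hi = 0, len(prefix)
--     while lo < hi:
--         mid = (lo + hi) // 2
--         if prefix[mid] > pos_chars:
--             hi = mid
--         else:
--             lo = mid + 1
--     idx = lo if lo < len(paragraphs) else len(paragraphs) - 1
--     return paragraphs[idx]
-- ===== Notes on version B (the rewrite author's own statement) =====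
-- stated objective: alternative
-- what changed: A's incremental scan with early return is replaced by building a prefix-sum table of (len(p)+2) and binary-searching it for the first cumulative total exceeding pos_chars, with the length-1 fallback index for positions past the end.
import Mathlib
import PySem

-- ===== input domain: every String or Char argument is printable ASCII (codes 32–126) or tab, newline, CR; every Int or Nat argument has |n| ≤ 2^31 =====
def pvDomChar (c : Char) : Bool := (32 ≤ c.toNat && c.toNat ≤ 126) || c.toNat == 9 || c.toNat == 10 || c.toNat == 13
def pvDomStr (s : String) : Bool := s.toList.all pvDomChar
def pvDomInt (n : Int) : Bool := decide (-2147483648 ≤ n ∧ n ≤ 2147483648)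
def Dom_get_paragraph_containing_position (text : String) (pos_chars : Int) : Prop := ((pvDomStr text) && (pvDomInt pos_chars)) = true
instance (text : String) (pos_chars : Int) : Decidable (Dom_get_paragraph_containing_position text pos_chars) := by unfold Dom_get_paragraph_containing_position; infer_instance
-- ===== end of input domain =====

-- B replaces A's incremental sequential scan by a pfx-sum table plus a hand-written
-- binary search over it (objective: alternative decomposition, same observable behaviour).

-- ===== PORT A =====
-- shared helper: Python split_into_paragraphs (identical in Source A and Source B).
-- split? is `some` here since the separator "\n\n" is nonempty, so `.getD []` never fires.
def pvSplitParas (text : String) : List String :=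
  if PySem.Str.len text = 0 ∨ PySem.Str.len (PySem.Str.strip text) = 0 then []
  else (((PySem.Str.split? text "\n\n").getD []).map PySem.Str.strip).filter
        (fun p => PySem.Str.len p ≠ 0)

-- A's for-loop with its early return: cumul += len(p)+2; if cumul > pos_chars: return p
def pvALoop (pos_chars : Int) (cumul : Int) : List String → Option String
  | [] => none
  | p :: rest =>
      let c := cumul + PySem.Str.len p + 2
      if c > pos_chars then some p else pvALoop pos_chars c rest

def get_paragraph_containing_position (text : String) (pos_chars : Int) : Option String :=
  let paragraphs := pvSplitParas text
  if (paragraphs.length : Int) < 2 then none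
  else
    match pvALoop pos_chars 0 paragraphs with
    | some p => some p
    | none => -- return paragraphs[-1] if paragraphs else None
        if paragraphs = [] then none else PySem.List.pyGet? paragraphs (-1)

-- ===== PORT B =====
-- Source B's pfx-sum building loop: pfx[i] = cumulative sum of (len(p)+2)
def pvPrefixSums (total : Int) : List String → List Int
  | [] => []
  | p :: rest =>
      let t := total + PySem.Str.len p + 2
      t :: pvPrefixSums t rest

-- Source B's while-loop binary search (lo, hi : Nat; (lo+hi)//2 on naturals is Nat division)
def pvBSearch (pfx : List Int) (pos_chars : Int) (lo hi : Nat) : Nat :=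
  if lo < hi then
    let mid := (lo + hi) / 2
    if pos_chars < pfx.getD mid 0 then pvBSearch pfx pos_chars lo mid
    else pvBSearch pfx pos_chars (mid + 1) hi
  else lo
termination_by hi - lo
decreasing_by all_goals omega

def get_paragraph_containing_position_alt (text : String) (pos_chars : Int) : Option String :=
  let paragraphs := pvSplitParas text
  if (paragraphs.length : Int) < 2 then none
  else
    let pfx := pvPrefixSums 0 paragraphs
    let lo := pvBSearch pfx pos_chars 0 pfx.length
    let idx := if lo < paragraphs.length then lo else paragraphs.length - 1
    PySem.List.pyGet? paragraphs (idx : Int)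

-- ===== PRECONDITION & SPEC =====
def Spec_get_paragraph_containing_position (text : String) (pos_chars : Int) (out : Option String) : Prop := out = get_paragraph_containing_position_alt text pos_chars
instance (text : String) (pos_chars : Int) (out : Option String) : Decidable (Spec_get_paragraph_containing_position text pos_chars out) := by unfold Spec_get_paragraph_containing_position; infer_instance

-- ===== CLAIM (what is proved, stated in full; the proofs are below) =====
def Claim_equal_get_paragraph_containing_position : Prop := ∀ (text : String) (pos_chars : Int), Dom_get_paragraph_containing_position text pos_chars → Spec_get_paragraph_containing_position text pos_chars (get_paragraph_containing_position text pos_chars)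

-- ===== LEMMAS AND PROOFS =====

theorem pvPrefixSums_length (ps : List String) : ∀ c, (pvPrefixSums c ps).length = ps.length := by
  induction ps with
  | nil => intro c; rfl
  | cons p rest ih => intro c; simp [pvPrefixSums, ih]

-- every entry of the pfx table strictly exceeds the starting total
theorem pvPrefixSums_gt (ps : List String) : ∀ c x, x ∈ pvPrefixSums c ps → c < x := by
  induction ps with
  | nil => intro c x hx; simp [pvPrefixSums] at hx
  | cons p rest ih =>
      intro c x hx
      simp only [pvPrefixSums, List.mem_cons] at hx
      have hlen : 0 ≤ PySem.Str.len p := by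
        rw [PySem.Str.len_eq]; positivity
      rcases hx with h | h
      · omega
      · have := ih _ _ h; omega

-- the pfx table is monotone (in the getD view the binary search reads)
theorem pvPrefixSums_mono (ps : List String) : ∀ c i j, i ≤ j → j < (pvPrefixSums c ps).length →
    (pvPrefixSums c ps).getD i 0 ≤ (pvPrefixSums c ps).getD j 0 := by
  induction ps with
  | nil => intro c i j _ hj; simp [pvPrefixSums] at hj
  | cons p rest ih =>
      intro c i j hij hj
      simp only [pvPrefixSums, List.length_cons] at hj ⊢
      match i, j with
      | 0, 0 => simp
      | 0, j + 1 =>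
          simp only [List.getD_cons_zero, List.getD_cons_succ]
          have hjlt : j < (pvPrefixSums (c + PySem.Str.len p + 2) rest).length := by omega
          have hmem : (pvPrefixSums (c + PySem.Str.len p + 2) rest).getD j 0
              ∈ pvPrefixSums (c + PySem.Str.len p + 2) rest := by
            rw [List.getD_eq_getElem _ _ hjlt]; exact List.getElem_mem hjlt
          have := pvPrefixSums_gt rest (c + PySem.Str.len p + 2) _ hmem
          omega
      | i + 1, j + 1 =>
          simp only [List.getD_cons_succ]
          exact ih _ i j (by omega) (by omega)

-- A's scan returns the paragraph at the first index whose pfx sum exceeds pos_chars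
theorem pvALoop_eq_findIdx (pos : Int) (ps : List String) : ∀ c,
    pvALoop pos c ps = ps[(pvPrefixSums c ps).findIdx (fun x => pos < x)]? := by
  induction ps with
  | nil => intro c; rfl
  | cons p rest ih =>
      intro c
      by_cases h : pos < c + (p.length : Int) + 2
      · simp [pvALoop, pvPrefixSums, List.findIdx_cons, PySem.Str.len_eq, h]
      · simp [pvALoop, pvPrefixSums, List.findIdx_cons, PySem.Str.len_eq, h, ih]

-- the binary search computes findIdx, given the invariants Source B's loop maintains
theorem pvBSearch_eq_findIdx (pre : List Int) (pos : Int)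
    (hm : ∀ i j, i ≤ j → j < pre.length → pre.getD i 0 ≤ pre.getD j 0) :
    ∀ k lo hi, hi - lo = k → lo ≤ hi → hi ≤ pre.length →
    (∀ i, i < lo → ¬ pos < pre.getD i 0) →
    (∀ i, hi ≤ i → i < pre.length → pos < pre.getD i 0) →
    pvBSearch pre pos lo hi = pre.findIdx (fun x => pos < x) := by
  intro k
  induction k using Nat.strong_induction_on with
  | _ k IH =>
      intro lo hi hk hle hhi hlo hhip
      rw [pvBSearch]
      by_cases hlt : lo < hi
      · rw [if_pos hlt]
        set mid := (lo + hi) / 2 with hmid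
        have hmlo : lo ≤ mid := by omega
        have hmhi : mid < hi := by omega
        by_cases hq : pos < pre.getD mid 0
        · rw [if_pos hq]
          refine IH (mid - lo) (by omega) lo mid rfl (by omega) (by omega) hlo ?_
          intro i hi1 hi2
          exact lt_of_lt_of_le hq (hm mid i hi1 hi2)
        · rw [if_neg hq]
          refine IH (hi - (mid + 1)) (by omega) (mid + 1) hi rfl (by omega) hhi ?_ hhip
          intro i hi1
          have : pre.getD i 0 ≤ pre.getD mid 0 := hm i mid (by omega) (by omega)
          omega
      · rw [if_neg hlt]
        have hlohi : lo = hi := by omega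
        set F := pre.findIdx (fun x => pos < x) with hF
        have hFle : F ≤ pre.length := List.findIdx_le_length
        by_contra hne
        rcases Nat.lt_or_ge F lo with hcase | hcase
        · -- F < lo = hi ≤ len: predicate holds at F, contradicting hlo
          have hFlen : F < pre.length := by omega
          have hp : (fun x => decide (pos < x)) pre[F] = true := List.findIdx_getElem (w := by omega)
          have : pos < pre.getD F 0 := by
            rw [List.getD_eq_getElem _ _ hFlen]; simpa using hp
          exact hlo F hcase this
        · -- lo < F: predicate fails at lo, contradicting hhip
          have hloF : lo < F := by omega
          have hlolen : lo < pre.length := by omega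
          have hp : (fun x => decide (pos < x)) pre[lo] = false := List.not_of_lt_findIdx hloF
          have : ¬ pos < pre.getD lo 0 := by
            rw [List.getD_eq_getElem _ _ hlolen]; simpa using hp
          exact this (hhip lo (by omega) hlolen)

-- ===== VERDICT (by name: the statement is the Claim_ definition above) =====
theorem get_paragraph_containing_position_spec : Claim_equal_get_paragraph_containing_position := by
  intro text pos_chars _
  unfold Spec_get_paragraph_containing_position
  unfold get_paragraph_containing_position get_paragraph_containing_position_alt
  set ps := pvSplitParas text with hps
  by_cases hshort : (ps.length : Int) < 2
  · simp [hshort]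
  · rw [if_neg hshort, if_neg hshort]
    have hn : 2 ≤ ps.length := by omega
    have hne : ps ≠ [] := by
      intro h; rw [h] at hn; simp at hn
    set pre := pvPrefixSums 0 ps with hpre
    have hlen : pre.length = ps.length := pvPrefixSums_length ps 0
    set F := pre.findIdx (fun x => pos_chars < x) with hF
    have hFle : F ≤ pre.length := List.findIdx_le_length
    have hbs : pvBSearch pre pos_chars 0 pre.length = F := by
      refine pvBSearch_eq_findIdx pre pos_chars (pvPrefixSums_mono ps 0) pre.length 0 pre.length
        rfl (by omega) (by omega) (by omega) (by omega)
    have hA : pvALoop pos_chars 0 ps = ps[F]? := by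
      rw [pvALoop_eq_findIdx pos_chars ps 0, ← hpre, ← hF]
    rw [hA]
    simp only [hbs]
    by_cases hlt : F < ps.length
    · -- loop returned early; binary search lands at the same index
      simp [if_pos hlt, PySem.List.pyGet?_natCast, List.getElem?_eq_getElem hlt]
    · -- loop fell through: F = length, A takes paragraphs[-1], B takes index length-1
      have hFeq : F = ps.length := by omega
      rw [hFeq, List.getElem?_eq_none (le_refl _)]
      simp [hne, PySem.List.pyGet?_natCast, PySem.List.pyGet?_neg_one,
        List.getLast?_eq_getElem?]
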